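-- pv_equiv track=rewrite | github.com/HMC-Makerspace/BLUEPRINT | test.py | encodedDistance
-- ===== SOURCE A (Python) =====
-- def encodedDistance(inches):
--     start = 65535
--     vector = [0, 1, 0, 1, 1, 0, 1, 0, 1, 1,
--               0, 1, 0, 1, 1, 0, 1, 0, 1, 1, 0, 1, 1]
--     # we always drop 39935
--     # we always rise 25600
--     result = []
--     stage = 0
--
--     for i in range(inches + 1):
--         if (vector[stage] == 0):
--             result.append(start - 39935)
--             start = start - 39935
--         else:
--             result.append(start + 25600)
--             start = start + 25600
--
--         stage = stage + 1
--
--         if (stage == 23):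
--             stage = 0
--
--     return int(hex(result[i-1]), 16)
-- ===== SOURCE B (Python) =====
-- # Closed form: each 23-step pattern cycle changes the value by -1015; a 23-entry
-- # prefix table gives the within-cycle offset, so the answer is O(1) instead of O(inches).
-- _CYCLE_DELTA = -1015
-- _PREFIX = [0, -39935, -14335, -54270, -28670, -3070, -43005, -17405, -57340,
--            -31740, -6140, -46075, -20475, -60410, -34810, -9210, -49145,
--            -23545, -63480, -37880, -12280, -52215, -26615]
--
-- def encodedDistance(inches):
--     cycles, step = divmod(inches, 23)
--     return 65535 + cycles * _CYCLE_DELTA + _PREFIX[step]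
-- ===== Notes on version B (the rewrite author's own statement) =====
-- stated objective: faster
-- what changed: Replaces the O(inches) step-by-step simulation (building a full result list) with an O(1) closed form: whole 23-step cycles contribute -1015 each, plus a 23-entry prefix table for the remainder.
-- intended difference: For inches = 0 A returns 25600 (its result[i-1] wraps to result[-1], the value after one step, so A(0) = A(1)); B returns 65535, the start value after zero steps, which is the intended cumulative value at step 0. — e.g. on encodedDistance(0): A returns 25600, B returns 65535
import Mathlib
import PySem

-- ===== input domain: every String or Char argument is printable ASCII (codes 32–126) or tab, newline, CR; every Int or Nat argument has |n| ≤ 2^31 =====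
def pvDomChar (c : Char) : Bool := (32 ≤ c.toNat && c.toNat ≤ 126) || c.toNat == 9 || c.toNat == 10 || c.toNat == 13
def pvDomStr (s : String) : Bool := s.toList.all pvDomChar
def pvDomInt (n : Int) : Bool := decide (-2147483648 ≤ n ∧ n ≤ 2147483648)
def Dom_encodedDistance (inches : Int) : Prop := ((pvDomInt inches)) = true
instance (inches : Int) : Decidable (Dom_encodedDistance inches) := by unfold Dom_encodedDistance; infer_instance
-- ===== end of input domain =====

-- B replaces A's O(inches) step-by-step simulation with an O(1) closed form
-- (whole-cycle delta -1015 plus a 23-entry prefix table).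

-- ===== PORT A =====
def vecA : List Int := [0, 1, 0, 1, 1, 0, 1, 0, 1, 1,
                        0, 1, 0, 1, 1, 0, 1, 0, 1, 1, 0, 1, 1]

-- one iteration of A's for-loop body over the state (start, result, stage);
-- vector[stage] is ported with pyGetD: stage always stays in [0, 23), so this is exact
def stepA (st : Int × List Int × Int) : Int × List Int × Int :=
  let start := st.1
  let result := st.2.1
  let stage := st.2.2
  let sr :=
    if PySem.List.pyGetD vecA stage 0 = 0 then
      (start - 39935, result ++ [start - 39935])
    else
      (start + 25600, result ++ [start + 25600])
  let stage1 := stage + 1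
  (sr.1, sr.2, if stage1 = 23 then 0 else stage1)

def encodedDistance (inches : Int) : Int :=
  let fin := (PySem.List.pyRange 0 (inches + 1) 1).foldl (fun st _i => stepA st)
    ((65535 : Int), ([] : List Int), (0 : Int))
  -- int(hex(x), 16) is exactly x for every Python int; result[i-1] with i = inches,
  -- the final loop index (the loop is nonempty whenever inches ≥ 0, i.e. under Pre_)
  PySem.List.pyGetD fin.2.1 (inches - 1) 0

-- ===== PORT B =====
def preTable : List Int := [0, -39935, -14335, -54270, -28670, -3070, -43005, -17405, -57340,
                            -31740, -6140, -46075, -20475, -60410, -34810, -9210, -49145,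
                            -23545, -63480, -37880, -12280, -52215, -26615]

def encodedDistance_alt (inches : Int) : Int :=
  let cycles := PySem.Int.floordiv inches 23
  let step := PySem.Int.mod inches 23
  65535 + cycles * (-1015) + PySem.List.pyGetD preTable step 0

-- ===== PRECONDITION & SPEC =====
-- Pre_ excludes inches < 0, where A raises UnboundLocalError (the loop never runs and i is unbound).
def Pre_encodedDistance (inches : Int) : Prop := 0 ≤ inches
instance (inches : Int) : Decidable (Pre_encodedDistance inches) := by unfold Pre_encodedDistance; infer_instance
def pvWitness_encodedDistance : Int := (5)

-- For inches = 0 A returns 25600 (its result[i-1] wraps to result[-1], the value after one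
-- step, so A(0) = A(1)); B returns 65535, the start value after zero steps, the intended
-- cumulative value at step 0.
def D_encodedDistance (inches : Int) : Prop := inches = 0
instance (inches : Int) : Decidable (D_encodedDistance inches) := by unfold D_encodedDistance; infer_instance

def Spec_encodedDistance (inches : Int) (out : Int) : Prop := ¬ D_encodedDistance inches → out = encodedDistance_alt inches
instance (inches : Int) (out : Int) : Decidable (Spec_encodedDistance inches out) := by unfold Spec_encodedDistance; infer_instance

def pvDiffWitness_encodedDistance : Int := (0)
def pvDiffWitnessOut_encodedDistance : Int × Int := (25600, 65535)

-- ===== CLAIM (what is proved, stated in full; the proofs are below) =====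
def Claim_unchanged_encodedDistance : Prop := ∀ (inches : Int), Dom_encodedDistance inches → Pre_encodedDistance inches → Spec_encodedDistance inches (encodedDistance inches)
def Claim_changed_encodedDistance : Prop := Dom_encodedDistance (pvDiffWitness_encodedDistance) ∧ Pre_encodedDistance (pvDiffWitness_encodedDistance) ∧ D_encodedDistance (pvDiffWitness_encodedDistance) ∧ encodedDistance (pvDiffWitness_encodedDistance) = pvDiffWitnessOut_encodedDistance.1 ∧ encodedDistance_alt (pvDiffWitness_encodedDistance) = pvDiffWitnessOut_encodedDistance.2 ∧ pvDiffWitnessOut_encodedDistance.1 ≠ pvDiffWitnessOut_encodedDistance.2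
def Claim_exact_encodedDistance : Prop := ∀ (inches : Int), Dom_encodedDistance inches → Pre_encodedDistance inches → D_encodedDistance inches → encodedDistance inches ≠ encodedDistance_alt inches

-- ===== LEMMAS AND PROOFS =====

-- the per-step delta of A's pattern at stage k
def dlt (k : Nat) : Int := if vecA.getD k 0 = 0 then -39935 else 25600

-- cumulative delta after n steps
def S : Nat → Int
  | 0 => 0
  | n + 1 => S n + dlt (n % 23)

theorem foldl_ignore {α β : Type} (f : α → α) (l : List β) (init : α) :
    l.foldl (fun st _ => f st) init = f^[l.length] init := by
  induction l generalizing init with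
  | nil => rfl
  | cons x xs ih => simp [List.foldl_cons, ih, Function.iterate_succ_apply]

theorem stage_step (n : Nat) :
    (if ((n % 23 : Nat) : Int) + 1 = 23 then (0 : Int) else ((n % 23 : Nat) : Int) + 1)
      = (((n + 1) % 23 : Nat) : Int) := by
  split_ifs with h
  · have : n % 23 = 22 := by exact_mod_cast (by omega : ((n % 23 : Nat) : Int) = 22)
    have : (n + 1) % 23 = 0 := by omega
    simp [this]
  · have h22 : n % 23 ≠ 22 := by
      intro hc; apply h; rw [hc]; norm_num
    have : (n + 1) % 23 = n % 23 + 1 := by omega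
    rw [this]; push_cast; ring

theorem loop_char (n : Nat) :
    stepA^[n] ((65535 : Int), ([] : List Int), (0 : Int))
      = (65535 + S n, (List.range n).map (fun k => 65535 + S (k + 1)), ((n % 23 : Nat) : Int)) := by
  induction n with
  | zero => simp [S]
  | succ n ih =>
    rw [Function.iterate_succ_apply', ih]
    have hS : S (n + 1) = S n + dlt (n % 23) := rfl
    by_cases hv : vecA.getD (n % 23) 0 = 0
    · have hd : dlt (n % 23) = -39935 := by unfold dlt; rw [if_pos hv]
      have he : (65535 : Int) + S (n + 1) = 65535 + S n - 39935 := by rw [hS, hd]; ring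
      simp only [stepA, PySem.List.pyGetD_natCast, if_pos hv, Prod.mk.injEq]
      refine ⟨by rw [hS, hd]; ring, ?_, stage_step n⟩
      rw [List.range_succ, List.map_append, List.map_cons, List.map_nil, he]
    · have hd : dlt (n % 23) = 25600 := by unfold dlt; rw [if_neg hv]
      have he : (65535 : Int) + S (n + 1) = 65535 + S n + 25600 := by rw [hS, hd]; ring
      simp only [stepA, PySem.List.pyGetD_natCast, if_neg hv, Prod.mk.injEq]
      refine ⟨by rw [hS, hd]; ring, ?_, stage_step n⟩
      rw [List.range_succ, List.map_append, List.map_cons, List.map_nil, he]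

theorem S_closed (n : Nat) :
    S n = ((n / 23 : Nat) : Int) * (-1015) + preTable.getD (n % 23) 0 := by
  induction n with
  | zero => simp [S, preTable]
  | succ n ih =>
    show S n + dlt (n % 23) = _
    rw [ih]
    rcases Nat.lt_or_ge (n % 23) 22 with h | h
    · have h1 : (n + 1) % 23 = n % 23 + 1 := by omega
      have h2 : (n + 1) / 23 = n / 23 := by omega
      rw [h1, h2]
      have hp : preTable.getD (n % 23) 0 + dlt (n % 23) = preTable.getD (n % 23 + 1) 0 := by
        have h0 : n % 23 < 22 := h
        set r := n % 23 with hr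
        interval_cases r <;> decide
      omega
    · have h0 : n % 23 = 22 := by omega
      have h1 : (n + 1) % 23 = 0 := by omega
      have h2 : (n + 1) / 23 = n / 23 + 1 := by omega
      rw [h0, h1, h2]
      have hp : preTable.getD 22 0 + dlt 22 = -1015 := by decide
      have hq : preTable.getD 0 (0 : Int) = 0 := by decide
      push_cast
      omega

theorem encodedDistance_closed (n : Nat) (hn : 1 ≤ n) :
    encodedDistance (n : Int) = 65535 + S n := by
  unfold encodedDistance
  rw [foldl_ignore, PySem.List.length_pyRange_one]
  have hlen : ((n : Int) + 1 - 0).toNat = n + 1 := by omega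
  rw [hlen, loop_char]
  have hidx : ((n : Int) - 1) = ((n - 1 : Nat) : Int) := by omega
  rw [hidx]
  simp only [PySem.List.pyGetD_natCast]
  have hlt : n - 1 < n + 1 := by omega
  rw [List.getD_eq_getElem _ _ (by simp only [List.length_map, List.length_range]; omega)]
  simp only [List.getElem_map, List.getElem_range]
  have : n - 1 + 1 = n := by omega
  rw [this]

theorem encodedDistance_alt_closed (n : Nat) :
    encodedDistance_alt (n : Int) = 65535 + S n := by
  unfold encodedDistance_alt
  have hd : PySem.Int.floordiv (n : Int) 23 = ((n / 23 : Nat) : Int) := by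
    exact_mod_cast PySem.Int.floordiv_natCast n 23
  have hm : PySem.Int.mod (n : Int) 23 = ((n % 23 : Nat) : Int) := by
    exact_mod_cast PySem.Int.mod_natCast n 23
  rw [hd, hm]
  simp only [PySem.List.pyGetD_natCast]
  rw [S_closed]
  ring

-- ===== VERDICT (by name: the statement is the Claim_ definition above) =====
theorem encodedDistance_spec : Claim_unchanged_encodedDistance := by
  intro inches _hdom hpre hD
  have h1 : 1 ≤ inches := by
    rcases lt_or_eq_of_le hpre with h | h
    · omega
    · exact absurd h.symm hD
  obtain ⟨n, rfl⟩ : ∃ n : Nat, inches = (n : Int) := ⟨inches.toNat, by omega⟩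
  rw [encodedDistance_closed n (by exact_mod_cast h1), encodedDistance_alt_closed n]

theorem encodedDistance_changed : Claim_changed_encodedDistance := by
  unfold Claim_changed_encodedDistance; decide

theorem encodedDistance_tight : Claim_exact_encodedDistance := by
  intro inches _ _ hD
  subst hD
  decide
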